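-- pv_equiv track=rewrite | github.com/Nux1232/Stacking-Cups | test_structures.py | calc
-- ===== SOURCE A (Python) =====
-- def calc(p):
--     T = {}
--     B = {}
--     for i, cup in enumerate(p):
--         max_B = 0
--         max_T = 0
--         for j in range(i):
--             if cup < p[j]:
--                 max_B = max(max_B, B[p[j]] + 1)
--             else:
--                 max_T = max(max_T, T[p[j]])
--         B[cup] = max(max_B, max_T)
--         T[cup] = B[cup] + 2*cup - 1
--     return max(T.values())
-- ===== SOURCE B (Python) =====
-- def calc(p):
--     # Coordinate-compress the cup values, then answer each step's two
--     # range-maximum queries (max B over values > cup, max T over values <= cup)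
--     # with two iterative max segment trees instead of a scan over earlier items.
--     # The B tree stores B[v] + 1 and the T tree stores T[v] at leaf idx[v];
--     # queries start from 0, matching the 0-initialised running maxima.
--     vals = sorted(set(p))
--     m = len(vals)
--     idx = {v: i for i, v in enumerate(vals)}
--     treeB = [0] * (2 * m)
--     treeT = [0] * (2 * m)
--
--     def update(tree, i, x):
--         i += m
--         tree[i] = x
--         i //= 2
--         while i >= 1:
--             tree[i] = max(tree[2 * i], tree[2 * i + 1])
--             i //= 2
--
--     def query(tree, l, r):
--         res = 0
--         l += m
--         r += m
--         while l < r: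
--             if l % 2 == 1:
--                 res = max(res, tree[l])
--                 l += 1
--             if r % 2 == 1:
--                 r -= 1
--                 res = max(res, tree[r])
--             l //= 2
--             r //= 2
--         return res
--
--     for cup in p:
--         k = idx[cup]
--         b = max(query(treeB, k + 1, m), query(treeT, 0, k + 1))
--         update(treeB, k, b + 1)
--         update(treeT, k, b + 2 * cup - 1)
--     return max(treeT[m + i] for i in range(m))
-- ===== Notes on version B (the rewrite author's own statement) =====
-- stated objective: faster
-- what changed: B coordinate-compresses the cup values and replaces A's inner scan over all earlier indices by two point-update/range-max iterative segment trees (one for B over values > cup, one for T over values <= cup), turning each step into O(log n) queries.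
-- outside the precondition, e.g. on calc([]): A raises ValueError, B raises ValueError
import Mathlib
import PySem

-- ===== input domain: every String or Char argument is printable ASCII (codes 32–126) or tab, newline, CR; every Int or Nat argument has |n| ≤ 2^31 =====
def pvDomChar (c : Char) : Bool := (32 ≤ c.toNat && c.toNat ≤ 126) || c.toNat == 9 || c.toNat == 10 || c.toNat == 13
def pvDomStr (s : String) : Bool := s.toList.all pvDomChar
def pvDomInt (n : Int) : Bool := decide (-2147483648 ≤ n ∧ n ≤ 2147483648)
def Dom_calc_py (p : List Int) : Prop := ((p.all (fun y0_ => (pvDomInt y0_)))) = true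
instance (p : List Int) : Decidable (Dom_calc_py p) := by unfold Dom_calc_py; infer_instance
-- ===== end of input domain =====

-- B coordinate-compresses the values and answers each step's two range-max
-- queries with two iterative max segment trees instead of A's scan over all
-- earlier indices (objective: faster; same return value on non-empty lists).

-- ===== PORT A =====
-- inner loop 'for j in range(i)': B[p[j]]/T[p[j]] ported as getD _ 0 — the key is
-- always present (p[j] was processed at step j < i), and j is always in range for p.
def pvInnerA (p : List Int) (T B : PySem.Dict Int Int) (i cup : Int) : Int × Int :=
  (PySem.List.pyRange 0 i 1).foldl
    (fun (m : Int × Int) j =>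
      let pj := PySem.List.pyGetD p j 0
      if cup < pj then (max m.1 (B.getD pj 0 + 1), m.2)
      else (m.1, max m.2 (T.getD pj 0)))
    (0, 0)

-- one iteration of A's outer loop; state (T, B); Python sets B[cup] then T[cup]
def pvStepA (p : List Int) (st : PySem.Dict Int Int × PySem.Dict Int Int)
    (ic : Int × Int) : PySem.Dict Int Int × PySem.Dict Int Int :=
  let m := pvInnerA p st.1 st.2 ic.1 ic.2
  let b := max m.1 m.2
  (st.1.insert ic.2 (b + 2 * ic.2 - 1), st.2.insert ic.2 b)

def calc_py (p : List Int) : Int :=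
  -- max(T.values()): Python raises ValueError on an empty dict → Pre_ excludes p = []
  match PySem.List.max?
      (((PySem.List.enumerate p 0).foldl (pvStepA p)
        (PySem.Dict.empty, PySem.Dict.empty)).1.values) (fun x => x) with
  | some m => m
  | none => 0

-- ===== PORT B =====
-- segment-tree loop variables are nonnegative Python ints whose '//2' is Nat
-- division, and every tree index accessed lies in range, so getD/set are exact.
-- 'while i >= 1: tree[i] = max(tree[2*i], tree[2*i+1]); i //= 2'
def pvUpdLoop (tree : List Int) (i : Nat) : List Int :=
  if _h : 1 ≤ i then
    pvUpdLoop (tree.set i (max (tree.getD (2 * i) 0) (tree.getD (2 * i + 1) 0))) (i / 2)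
  else tree
termination_by i
decreasing_by omega

-- 'def update(tree, i, x)' (i here is the leaf offset k; python does i += m first)
def pvUpdate (tree : List Int) (m k : Nat) (x : Int) : List Int :=
  pvUpdLoop (tree.set (m + k) x) ((m + k) / 2)

-- 'while l < r: …' of 'def query(tree, l, r)'
def pvQLoop (tree : List Int) (l r : Nat) (res : Int) : Int :=
  if _h : l < r then
    let res1 := if l % 2 = 1 then max res (tree.getD l 0) else res
    let l1 := if l % 2 = 1 then l + 1 else l
    let res2 := if r % 2 = 1 then max res1 (tree.getD (r - 1) 0) else res1
    let r1 := if r % 2 = 1 then r - 1 else r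
    pvQLoop tree (l1 / 2) (r1 / 2) res2
  else res
termination_by r
decreasing_by split_ifs <;> omega

def pvQuery (tree : List Int) (m l r : Nat) : Int :=
  pvQLoop tree (m + l) (m + r) 0

def calc_py_alt (p : List Int) : Int :=
  let vals := PySem.List.sorted (PySem.Set.ofList p) (fun x => x) false
  let m := vals.length
  -- idx = {v: i for i, v in enumerate(vals)}
  let idx := (PySem.List.enumerate vals 0).foldl
    (fun (d : PySem.Dict Int Int) q => d.insert q.2 q.1) PySem.Dict.empty
  let st := p.foldl
    (fun (st : List Int × List Int) cup =>
      -- k = idx[cup]: the key is always present (cup ∈ vals), and k ≥ 0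
      let k := (idx.getD cup 0).toNat
      let b := max (pvQuery st.1 m (k + 1) m) (pvQuery st.2 m 0 (k + 1))
      (pvUpdate st.1 m k (b + 1), pvUpdate st.2 m k (b + 2 * cup - 1)))
    (List.replicate (2 * m) 0, List.replicate (2 * m) 0)
  -- max(treeT[m+i] for i in range(m)): raises ValueError iff m = 0 → Pre_ excludes p = []
  match PySem.List.max?
      ((List.range m).map (fun i => st.2.getD (m + i) 0)) (fun x => x) with
  | some v => v
  | none => 0

-- ===== PRECONDITION & SPEC =====
-- Pre_ excludes only p = [], on which both A and B raise ValueError (max of empty).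
def Pre_calc_py (p : List Int) : Prop := p ≠ []
instance (p : List Int) : Decidable (Pre_calc_py p) := by unfold Pre_calc_py; infer_instance
def pvWitness_calc_py : List Int := ([3, 1, 3, 2])

def Spec_calc_py (p : List Int) (out : Int) : Prop := out = calc_py_alt p
instance (p : List Int) (out : Int) : Decidable (Spec_calc_py p out) := by unfold Spec_calc_py; infer_instance

-- ===== CLAIM (what is proved, stated in full; the proofs are below) =====
def Claim_equal_calc_py : Prop := ∀ (p : List Int), Dom_calc_py p → Pre_calc_py p → Spec_calc_py p (calc_py p)

-- ===== LEMMAS AND PROOFS =====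

-- ghost state: the per-distinct-value dict v ↦ (B[v], T[v]) both programs realise
def pvGStep (d : PySem.Dict Int (Int × Int)) (cup : Int) : PySem.Dict Int (Int × Int) :=
  let m := d.items.foldl
    (fun (m : Int × Int) q =>
      if cup < q.1 then (max m.1 (q.2.1 + 1), m.2)
      else (m.1, max m.2 q.2.2))
    (0, 0)
  let nb := max m.1 m.2
  d.insert cup (nb, nb + 2 * cup - 1)

-- the pair-fold of the two running maxima splits into its components
lemma pv_split {α : Type} (P : α → Prop) [DecidablePred P] (f g : α → Int) :
    ∀ (l : List α) (a b : Int),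
      l.foldl (fun (m : Int × Int) v =>
        if P v then (max m.1 (f v), m.2) else (m.1, max m.2 (g v))) (a, b)
      = (l.foldl (fun acc v => if P v then max acc (f v) else acc) a,
         l.foldl (fun acc v => if P v then acc else max acc (g v)) b) := by
  intro l
  induction l with
  | nil => intro a b; rfl
  | cons x t ih =>
    intro a b
    simp only [List.foldl_cons]
    by_cases h : P x
    · simp only [if_pos h]; exact ih _ _
    · simp only [if_neg h]; exact ih _ _

-- bounds for a guarded running max
lemma pv_foldIf_bounds {α : Type} (P : α → Prop) [DecidablePred P] (f : α → Int) :
    ∀ (l : List α) (a : Int),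
      a ≤ l.foldl (fun acc v => if P v then max acc (f v) else acc) a
      ∧ ∀ v ∈ l, P v → f v ≤ l.foldl (fun acc v => if P v then max acc (f v) else acc) a := by
  intro l
  induction l with
  | nil => intro a; simp
  | cons x t ih =>
    intro a
    simp only [List.foldl_cons, List.mem_cons]
    constructor
    · refine le_trans ?_ (ih _).1
      by_cases h : P x
      · simp [if_pos h]
      · simp [if_neg h]
    · rintro v (rfl | hv) hP
      · refine le_trans ?_ (ih _).1
        simp [if_pos hP]
      · exact (ih _).2 v hv hP

lemma pv_foldIf_ub {α : Type} (P : α → Prop) [DecidablePred P] (f : α → Int) :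
    ∀ (l : List α) (a : Int) (x : Int), a ≤ x → (∀ v ∈ l, P v → f v ≤ x) →
      l.foldl (fun acc v => if P v then max acc (f v) else acc) a ≤ x := by
  intro l
  induction l with
  | nil => intro a x ha _; simpa using ha
  | cons y t ih =>
    intro a x ha hl
    simp only [List.foldl_cons]
    refine ih _ x ?_ (fun v hv hP => hl v (List.mem_cons_of_mem _ hv) hP)
    by_cases h : P y
    · simp only [if_pos h]
      exact max_le ha (hl y (List.mem_cons_self) h)
    · simpa [if_neg h] using ha

-- a guarded running max only depends on the SET of scanned elements
lemma pv_foldIf_eq_of_mem_iff {α : Type} (P : α → Prop) [DecidablePred P] (f : α → Int)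
    (l1 l2 : List α) (a : Int) (h : ∀ v, v ∈ l1 ↔ v ∈ l2) :
    l1.foldl (fun acc v => if P v then max acc (f v) else acc) a
    = l2.foldl (fun acc v => if P v then max acc (f v) else acc) a := by
  apply le_antisymm
  · exact pv_foldIf_ub P f l1 _ _ (pv_foldIf_bounds P f l2 a).1
      (fun v hv hP => (pv_foldIf_bounds P f l2 a).2 v ((h v).1 hv) hP)
  · exact pv_foldIf_ub P f l2 _ _ (pv_foldIf_bounds P f l1 a).1
      (fun v hv hP => (pv_foldIf_bounds P f l1 a).2 v ((h v).2 hv) hP)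

-- 'for j in range(n): … p[j] …' is a fold over the prefix p.take n
lemma pv_take_fold {α : Type} (p : List Int) (f : α → Int → α) :
    ∀ (n : Nat), n ≤ p.length → ∀ (init : α),
      (PySem.List.pyRange 0 (n : Int) 1).foldl
        (fun m j => f m (PySem.List.pyGetD p j 0)) init
      = (p.take n).foldl f init := by
  intro n
  induction n with
  | zero => intro _ init; simp
  | succ k ih =>
    intro hk init
    have hcast : ((k + 1 : Nat) : Int) = (k : Int) + 1 := by push_cast; ring
    rw [hcast, PySem.List.pyRange_one_succ_right (by positivity), List.foldl_append]
    have hklen : k < p.length := by omega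
    rw [ih (by omega) init]
    have : p.take (k + 1) = p.take k ++ [p[k]] := by
      rw [List.take_add_one]; simp [List.getElem?_eq_getElem hklen]
    rw [this, List.foldl_append]
    simp [PySem.List.pyGetD_natCast, List.getD_eq_getElem?_getD,
      List.getElem?_eq_getElem hklen]

-- inserting the new cup preserves 'T is d with values projected by g'
lemma pv_items_insert_map (d : PySem.Dict Int (Int × Int)) (T : PySem.Dict Int Int)
    (g : Int × Int → Int) (hT : T.items = d.items.map (fun q => (q.1, g q.2)))
    (cup : Int) (w : Int × Int) :
    (T.insert cup (g w)).items = (d.insert cup w).items.map (fun q => (q.1, g q.2)) := by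
  have hkeys : T.keys = d.keys := by
    simp only [PySem.Dict.keys, hT, List.map_map]; rfl
  have hcont : T.contains cup = d.contains cup := by
    rw [PySem.Dict.contains_eq_decide_mem_keys, PySem.Dict.contains_eq_decide_mem_keys, hkeys]
  rw [PySem.Dict.items_insert, PySem.Dict.items_insert, hcont]
  by_cases h : d.contains cup
  · simp only [h, if_true, hT, List.map_map]
    apply List.map_congr_left
    intro q _
    by_cases hq : q.1 = cup
    · simp [Function.comp, hq]
    · simp [Function.comp, hq]
  · simp [eq_false_of_ne_true h, hT]

-- the A-side loop invariant: A's (T, B) are the two value-projections of the ghost dict d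
lemma pv_loop_rel (p : List Int) :
    ∀ (rest pre : List Int) (d : PySem.Dict Int (Int × Int)) (T B : PySem.Dict Int Int),
      p = pre ++ rest →
      T.items = d.items.map (fun q => (q.1, q.2.2)) →
      B.items = d.items.map (fun q => (q.1, q.2.1)) →
      d.keys.Nodup →
      (∀ v, v ∈ d.keys ↔ v ∈ pre) →
      ((PySem.List.enumerate rest (pre.length : Int)).foldl (pvStepA p) (T, B)).1.items
        = ((rest.foldl pvGStep d).items).map (fun q => (q.1, q.2.2)) := by
  intro rest
  induction rest with
  | nil => intro pre d T B _ hT hB _ _; simpa [PySem.List.enumerate_nil] using hT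
  | cons cup rest' ih =>
    intro pre d T B hp hT hB hnd hmem
    rw [PySem.List.enumerate_cons, List.foldl_cons, List.foldl_cons]
    have hkeysT : T.keys = d.keys := by
      simp only [PySem.Dict.keys, hT, List.map_map]; rfl
    have hkeysB : B.keys = d.keys := by
      simp only [PySem.Dict.keys, hB, List.map_map]; rfl
    have hgetB : ∀ q ∈ d.items, B.getD q.1 0 = q.2.1 := by
      intro q hq
      have hm : (q.1, q.2.1) ∈ B.items := by
        rw [hB]
        exact List.mem_map_of_mem (f := fun q => (q.1, q.2.1)) hq
      exact PySem.Dict.getD_of_mem_items B hm (by rw [hkeysB]; exact hnd) 0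
    have hgetT : ∀ q ∈ d.items, T.getD q.1 0 = q.2.2 := by
      intro q hq
      have hm : (q.1, q.2.2) ∈ T.items := by
        rw [hT]
        exact List.mem_map_of_mem (f := fun q => (q.1, q.2.2)) hq
      exact PySem.Dict.getD_of_mem_items T hm (by rw [hkeysT]; exact hnd) 0
    have hlen : pre.length ≤ p.length := by
      subst hp; simp
    have htake : p.take pre.length = pre := by
      subst hp; exact List.take_left
    have hinner :
        pvInnerA p T B (pre.length : Int) cup
        = d.items.foldl
            (fun (m : Int × Int) q =>
              if cup < q.1 then (max m.1 (q.2.1 + 1), m.2)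
              else (m.1, max m.2 q.2.2)) (0, 0) := by
      unfold pvInnerA
      rw [pv_take_fold p
        (fun (m : Int × Int) v =>
          if cup < v then (max m.1 (B.getD v 0 + 1), m.2)
          else (m.1, max m.2 (T.getD v 0))) pre.length hlen (0, 0), htake]
      have hcongr :
          d.items.foldl
            (fun (m : Int × Int) q =>
              if cup < q.1 then (max m.1 (q.2.1 + 1), m.2)
              else (m.1, max m.2 q.2.2)) (0, 0)
          = d.items.foldl
              (fun (m : Int × Int) q =>
                if cup < q.1 then (max m.1 (B.getD q.1 0 + 1), m.2)
                else (m.1, max m.2 (T.getD q.1 0))) (0, 0) := by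
        apply PySem.List.foldl_congr_mem
        intro m q hq
        rw [hgetB q hq, hgetT q hq]
      rw [hcongr, ← List.foldl_map (f := fun (q : Int × Int × Int) => q.1)
        (g := fun (m : Int × Int) v =>
          if cup < v then (max m.1 (B.getD v 0 + 1), m.2)
          else (m.1, max m.2 (T.getD v 0))) (l := d.items) (init := ((0 : Int), (0 : Int)))]
      have hkd : d.items.map (fun q => q.1) = d.keys := rfl
      rw [hkd]
      rw [pv_split (fun v => cup < v) (fun v => B.getD v 0 + 1) (fun v => T.getD v 0) pre 0 0,
          pv_split (fun v => cup < v) (fun v => B.getD v 0 + 1) (fun v => T.getD v 0) d.keys 0 0]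
      have hswap : ∀ (l : List Int) (a : Int),
          l.foldl (fun acc v => if cup < v then acc else max acc (T.getD v 0)) a
          = l.foldl (fun acc v => if ¬ cup < v then max acc (T.getD v 0) else acc) a := by
        intro l a
        apply PySem.List.foldl_congr_mem
        intro acc x _
        by_cases h : cup < x <;> simp [h]
      rw [Prod.mk.injEq]
      refine ⟨pv_foldIf_eq_of_mem_iff _ _ pre d.keys 0 (fun v => (hmem v).symm), ?_⟩
      rw [hswap pre, hswap d.keys]
      exact pv_foldIf_eq_of_mem_iff (fun v => ¬ cup < v) _ pre d.keys 0 (fun v => (hmem v).symm)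
    have hstep :
        pvStepA p (T, B) ((pre.length : Int), cup)
        = (T.insert cup ((max (pvInnerA p T B (pre.length : Int) cup).1
              (pvInnerA p T B (pre.length : Int) cup).2) + 2 * cup - 1),
           B.insert cup (max (pvInnerA p T B (pre.length : Int) cup).1
              (pvInnerA p T B (pre.length : Int) cup).2)) := rfl
    rw [hstep]
    have hstepB :
        pvGStep d cup
        = d.insert cup
            (max (pvInnerA p T B (pre.length : Int) cup).1
               (pvInnerA p T B (pre.length : Int) cup).2,
             max (pvInnerA p T B (pre.length : Int) cup).1
               (pvInnerA p T B (pre.length : Int) cup).2 + 2 * cup - 1) := by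
      unfold pvGStep
      rw [← hinner]
    rw [hstepB]
    set b := max (pvInnerA p T B (pre.length : Int) cup).1
        (pvInnerA p T B (pre.length : Int) cup).2 with hb
    have hlen' : ((pre ++ [cup]).length : Int) = (pre.length : Int) + 1 := by
      simp
    rw [← hlen']
    apply ih (pre ++ [cup])
    · subst hp; simp
    · exact pv_items_insert_map d T (fun q => q.2) hT cup (b, b + 2 * cup - 1)
    · exact pv_items_insert_map d B (fun q => q.1) hB cup (b, b + 2 * cup - 1)
    · exact PySem.Dict.nodup_keys_insert d cup _ hnd
    · intro v
      rw [PySem.Dict.mem_keys_insert]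
      simp only [List.mem_append, List.mem_singleton]
      rw [hmem v]
      tauto


-- ---------- B-side: segment-tree lemmas ----------

lemma pv_getD_set_self (l : List Int) (i : Nat) (v : Int) (h : i < l.length) :
    (l.set i v).getD i 0 = v := by
  simp [List.getD_eq_getElem?_getD, h]

lemma pv_getD_set_ne (l : List Int) (i j : Nat) (v : Int) (h : i ≠ j) :
    (l.set i v).getD j 0 = l.getD j 0 := by
  simp [List.getD_eq_getElem?_getD, h]

-- running max over the tree entries at indices [l, l+n)
def pvRFold (tree : List Int) (l n : Nat) (res : Int) : Int :=
  (List.range' l n).foldl (fun acc j => max acc (tree.getD j 0)) res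

lemma pv_rfold_peelL (t : List Int) (l n : Nat) (res : Int) :
    pvRFold t l (n + 1) res = pvRFold t (l + 1) n (max res (t.getD l 0)) := by
  simp [pvRFold, List.range'_succ]

lemma pv_rfold_peelR (t : List Int) (l n : Nat) (res : Int) :
    pvRFold t l (n + 1) res = max (pvRFold t l n res) (t.getD (l + n) 0) := by
  simp [pvRFold, List.range'_concat]

lemma pv_rfold_max_out (t : List Int) :
    ∀ (n l : Nat) (c y : Int), pvRFold t l n (max c y) = max (pvRFold t l n c) y := by
  intro n
  induction n with
  | zero => intro l c y; simp [pvRFold]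
  | succ k ih =>
    intro l c y
    rw [pv_rfold_peelL, pv_rfold_peelL]
    rw [show max (max c y) (t.getD l 0) = max (max c (t.getD l 0)) y by
      rw [max_assoc, max_comm y, max_assoc]]
    exact ih _ _ _

lemma pv_reindex (m : Nat) (t : List Int)
    (hinv : ∀ x, 1 ≤ x → x < m → t.getD x 0 = max (t.getD (2 * x) 0) (t.getD (2 * x + 1) 0)) :
    ∀ (k a : Nat) (res : Int), 1 ≤ a → a + k ≤ m →
      pvRFold t (2 * a) (2 * k) res = pvRFold t a k res := by
  intro k
  induction k with
  | zero => intro a res _ _; rfl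
  | succ j ih =>
    intro a res ha hk
    rw [show 2 * (j + 1) = (2 * j + 1) + 1 by ring, pv_rfold_peelL, pv_rfold_peelL,
      show 2 * a + 1 + 1 = 2 * (a + 1) by ring]
    rw [show max (max res (t.getD (2 * a) 0)) (t.getD (2 * a + 1) 0)
        = max res (t.getD a 0) by
      rw [hinv a ha (by omega), max_assoc]]
    rw [ih (a + 1) _ (by omega) (by omega), pv_rfold_peelL]

lemma pv_qloop_eq (m : Nat) (t : List Int)
    (hinv : ∀ x, 1 ≤ x → x < m → t.getD x 0 = max (t.getD (2 * x) 0) (t.getD (2 * x + 1) 0)) :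
    ∀ (r l : Nat) (res : Int), 1 ≤ l → l ≤ r → r ≤ 2 * m →
      pvQLoop t l r res = pvRFold t l (r - l) res := by
  intro r
  induction r using Nat.strong_induction_on with
  | _ r ih =>
    intro l res hl hlr hr
    rw [pvQLoop]
    by_cases h : l < r
    case neg =>
      rw [dif_neg h, show r - l = 0 by omega]
      simp [pvRFold]
    rw [dif_pos h]
    · have step : ∀ (l1 r1 : Nat) (res2 : Int), l1 % 2 = 0 → r1 % 2 = 0 → 2 ≤ l1 →
          l1 ≤ r1 → r1 ≤ 2 * m → r1 ≤ r →
          pvQLoop t (l1 / 2) (r1 / 2) res2 = pvRFold t l1 (r1 - l1) res2 := by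
        intro l1 r1 res2 he1 he2 h2 h12 hm2 hrr
        calc pvQLoop t (l1 / 2) (r1 / 2) res2
            = pvRFold t (l1 / 2) (r1 / 2 - l1 / 2) res2 :=
              ih (r1 / 2) (by omega) (l1 / 2) res2 (by omega) (by omega) (by omega)
          _ = pvRFold t (2 * (l1 / 2)) (2 * (r1 / 2 - l1 / 2)) res2 :=
              (pv_reindex m t hinv (r1 / 2 - l1 / 2) (l1 / 2) res2 (by omega) (by omega)).symm
          _ = pvRFold t l1 (r1 - l1) res2 := by
              rw [show 2 * (l1 / 2) = l1 by omega, show 2 * (r1 / 2 - l1 / 2) = r1 - l1 by omega]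
      by_cases hlp : l % 2 = 1
      · by_cases hrp : r % 2 = 1
        · simp only [if_pos hlp, if_pos hrp]
          rw [step (l + 1) (r - 1) _ (by omega) (by omega) (by omega) (by omega) (by omega) (by omega)]
          rw [show r - l = ((r - 1 - (l + 1)) + 1) + 1 by omega, pv_rfold_peelL, pv_rfold_peelR,
            show l + 1 + (r - 1 - (l + 1)) = r - 1 by omega, ← pv_rfold_max_out]
        · simp only [if_pos hlp, if_neg hrp]
          rw [step (l + 1) r _ (by omega) (by omega) (by omega) (by omega) (by omega) (by omega)]
          rw [show r - l = (r - (l + 1)) + 1 by omega, pv_rfold_peelL]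
      · by_cases hrp : r % 2 = 1
        · simp only [if_neg hlp, if_pos hrp]
          rw [step l (r - 1) _ (by omega) (by omega) (by omega) (by omega) (by omega) (by omega)]
          rw [show r - l = (r - 1 - l) + 1 by omega, pv_rfold_peelR,
            show l + (r - 1 - l) = r - 1 by omega, ← pv_rfold_max_out]
        · simp only [if_neg hlp, if_neg hrp]
          exact step l r res (by omega) (by omega) (by omega) (by omega) (by omega) (by omega)

lemma pv_query_eq (m : Nat) (t : List Int)
    (hinv : ∀ x, 1 ≤ x → x < m → t.getD x 0 = max (t.getD (2 * x) 0) (t.getD (2 * x + 1) 0))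
    (a b : Nat) (hm : 1 ≤ m) (hab : a ≤ b) (hb : b ≤ m) :
    pvQuery t m a b = pvRFold t (m + a) (b - a) 0 := by
  have h := pv_qloop_eq m t hinv (m + b) (m + a) 0 (by omega) (by omega) (by omega)
  rw [pvQuery, h, show m + b - (m + a) = b - a by omega]

-- ---------- update restores the tree invariant ----------

def pvOnPath (i x : Nat) : Prop := ∃ t, i / 2 ^ t = x

lemma pv_onPath_self (i : Nat) : pvOnPath i i := ⟨0, by simp⟩

lemma pv_onPath_le {i x : Nat} (h : pvOnPath i x) : x ≤ i := by
  obtain ⟨t, rfl⟩ := h; exact Nat.div_le_self _ _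

lemma pv_onPath_cases {i x : Nat} (h : pvOnPath i x) : x = i ∨ pvOnPath (i / 2) x := by
  obtain ⟨t, rfl⟩ := h
  cases t with
  | zero => left; simp
  | succ s => right; exact ⟨s, by rw [Nat.div_div_eq_div_mul, ← Nat.mul_comm, ← pow_succ]⟩

lemma pv_updLoop_length : ∀ (i : Nat) (tree : List Int), (pvUpdLoop tree i).length = tree.length := by
  intro i
  induction i using Nat.strong_induction_on with
  | _ i ih =>
    intro tree
    rw [pvUpdLoop]
    split_ifs with h
    · rw [ih (i / 2) (by omega)]; simp
    · rfl

lemma pv_updLoop_getD_high : ∀ (i : Nat) (tree : List Int) (j : Nat), i < j →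
    (pvUpdLoop tree i).getD j 0 = tree.getD j 0 := by
  intro i
  induction i using Nat.strong_induction_on with
  | _ i ih =>
    intro tree j hj
    rw [pvUpdLoop]
    split_ifs with h
    · rw [ih (i / 2) (by omega) _ j (by omega)]
      simp [List.getD_eq_getElem?_getD, List.getElem?_set_ne (show i ≠ j by omega)]
    · rfl

lemma pv_updLoop_inv (m : Nat) : ∀ (i : Nat) (tree : List Int), i < m → m ≤ tree.length →
    (∀ x, 1 ≤ x → x < m → ¬ pvOnPath i x →
      tree.getD x 0 = max (tree.getD (2 * x) 0) (tree.getD (2 * x + 1) 0)) →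
    ∀ x, 1 ≤ x → x < m →
      (pvUpdLoop tree i).getD x 0
        = max ((pvUpdLoop tree i).getD (2 * x) 0) ((pvUpdLoop tree i).getD (2 * x + 1) 0) := by
  intro i
  induction i using Nat.strong_induction_on with
  | _ i ih =>
    intro tree him hlen hexc
    rw [pvUpdLoop]
    split_ifs with h
    · apply ih (i / 2) (by omega) _ (by omega) (by simpa using hlen)
      intro x h1 h2 hnp
      by_cases hx : x = i
      · subst hx
        rw [pv_getD_set_self _ _ _ (by omega),
          pv_getD_set_ne _ _ _ _ (show x ≠ 2 * x by omega),
          pv_getD_set_ne _ _ _ _ (show x ≠ 2 * x + 1 by omega)]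
      · have hnp' : ¬ pvOnPath i x := by
          intro hp
          rcases pv_onPath_cases hp with h' | h'
          · exact hx h'
          · exact hnp h'
        have hc1 : i ≠ 2 * x := by
          intro h'
          exact hnp (h' ▸ (by rw [show 2 * x / 2 = x by omega]; exact pv_onPath_self x))
        have hc2 : i ≠ 2 * x + 1 := by
          intro h'
          exact hnp (h' ▸ (by rw [show (2 * x + 1) / 2 = x by omega]; exact pv_onPath_self x))
        rw [pv_getD_set_ne _ _ _ _ (show i ≠ x from fun h' => hx h'.symm),
          pv_getD_set_ne _ _ _ _ hc1, pv_getD_set_ne _ _ _ _ hc2]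
        exact hexc x h1 h2 hnp'
    · intro x h1 h2
      apply hexc x h1 h2
      intro hp
      have := pv_onPath_le hp
      omega

lemma pv_update_length (m k : Nat) (x : Int) (tree : List Int) :
    (pvUpdate tree m k x).length = tree.length := by
  rw [pvUpdate, pv_updLoop_length]; simp

lemma pv_update_leaf (m k : Nat) (x : Int) (tree : List Int) (hk : k < m)
    (hlen : tree.length = 2 * m) (j : Nat) (hj : j < m) :
    (pvUpdate tree m k x).getD (m + j) 0 = if j = k then x else tree.getD (m + j) 0 := by
  rw [pvUpdate, pv_updLoop_getD_high _ _ _ (by omega)]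
  by_cases h : j = k
  · subst h
    rw [if_pos rfl]
    exact pv_getD_set_self _ _ _ (by omega)
  · rw [if_neg h]
    exact pv_getD_set_ne _ _ _ _ (show m + k ≠ m + j by omega)

lemma pv_update_inv (m k : Nat) (x : Int) (tree : List Int) (hk : k < m)
    (hlen : tree.length = 2 * m)
    (hinv : ∀ y, 1 ≤ y → y < m → tree.getD y 0 = max (tree.getD (2 * y) 0) (tree.getD (2 * y + 1) 0)) :
    ∀ y, 1 ≤ y → y < m →
      (pvUpdate tree m k x).getD y 0
        = max ((pvUpdate tree m k x).getD (2 * y) 0) ((pvUpdate tree m k x).getD (2 * y + 1) 0) := by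
  rw [pvUpdate]
  apply pv_updLoop_inv m ((m + k) / 2) _ (by omega) (by simp; omega)
  intro y h1 h2 hnp
  have hset : ∀ z, z ≠ m + k → ((tree.set (m + k) x).getD z 0) = tree.getD z 0 := by
    intro z hz
    exact pv_getD_set_ne _ _ _ _ (fun h => hz h.symm)
  have hy : y ≠ m + k := by omega
  have hy2 : 2 * y ≠ m + k := by
    intro h
    apply hnp
    rw [show (m + k) / 2 = y by omega]
    exact pv_onPath_self y
  have hy3 : 2 * y + 1 ≠ m + k := by
    intro h
    apply hnp
    rw [show (m + k) / 2 = y by omega]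
    exact pv_onPath_self y
  rw [hset y hy, hset _ hy2, hset _ hy3]
  exact hinv y h1 h2

-- ---------- the tree state of B ----------

def pvTreeOK (m : Nat) (tree : List Int) (f : Nat → Int) : Prop :=
  tree.length = 2 * m ∧ (∀ j, j < m → tree.getD (m + j) 0 = f j) ∧
  (∀ x, 1 ≤ x → x < m → tree.getD x 0 = max (tree.getD (2 * x) 0) (tree.getD (2 * x + 1) 0))

lemma pv_treeOK_replicate (m : Nat) : pvTreeOK m (List.replicate (2 * m) 0) (fun _ => 0) := by
  have h0 : ∀ i : Nat, (List.replicate (2 * m) (0 : Int)).getD i 0 = 0 := by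
    intro i
    rw [List.getD_eq_getElem?_getD, List.getElem?_replicate]
    split_ifs <;> rfl
  exact ⟨by simp, fun j hj => h0 _, fun x h1 h2 => by rw [h0, h0, h0]; simp⟩

lemma pv_treeOK_update (m k : Nat) (x : Int) (tree : List Int) (f : Nat → Int)
    (h : pvTreeOK m tree f) (hk : k < m) :
    pvTreeOK m (pvUpdate tree m k x) (fun j => if j = k then x else f j) := by
  obtain ⟨hlen, hleaf, hinv⟩ := h
  refine ⟨by rw [pv_update_length, hlen], fun j hj => ?_, pv_update_inv m k x tree hk hlen hinv⟩
  rw [pv_update_leaf m k x tree hk hlen j hj]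
  by_cases hjk : j = k
  · simp [hjk]
  · have hb : (fun j => if j = k then x else f j) j = f j := by simp [hjk]
    rw [hb, if_neg hjk]
    exact hleaf j hj

lemma pv_query_leaves (m : Nat) (t : List Int) (f : Nat → Int) (h : pvTreeOK m t f)
    (a b : Nat) (hm : 1 ≤ m) (hab : a ≤ b) (hb : b ≤ m) :
    pvQuery t m a b = (List.range' a (b - a)).foldl (fun acc j => max acc (f j)) 0 := by
  obtain ⟨hlen, hleaf, hinv⟩ := h
  rw [pv_query_eq m t hinv a b hm hab hb, pvRFold]
  rw [show m + a = m + a from rfl]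
  have hmap : (List.range' a (b - a)).map (fun j => m + j) = List.range' (m + a) (b - a) := by
    simpa using List.map_add_range' (a := m) (s := a) (n := b - a) (step := 1)
  rw [← hmap, List.foldl_map]
  apply PySem.List.foldl_congr_mem
  intro acc j hjmem
  have : a ≤ j ∧ j < a + (b - a) := by simpa [List.mem_range'_1] using hjmem
  rw [hleaf j (by omega)]

-- ---------- values, sorted distinct values, index dict ----------

def pvFB (vals : List Int) (d : PySem.Dict Int (Int × Int)) (j : Nat) : Int :=
  match d.get? (vals.getD j 0) with
  | some q => q.1 + 1
  | none => 0

def pvFT (vals : List Int) (d : PySem.Dict Int (Int × Int)) (j : Nat) : Int :=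
  match d.get? (vals.getD j 0) with
  | some q => q.2
  | none => 0

lemma pv_idx_getD (vals : List Int) (hnd : vals.Nodup) (k : Nat) (hk : k < vals.length) :
    ((PySem.List.enumerate vals 0).foldl
        (fun (d : PySem.Dict Int Int) q => d.insert q.2 q.1) PySem.Dict.empty).getD
      (vals[k]) 0 = (k : Int) := by
  have hfresh : ∀ a ∈ PySem.List.enumerate vals 0,
      (PySem.Dict.empty : PySem.Dict Int Int).contains a.2 = false := by
    intro a _
    exact PySem.Dict.contains_empty _
  have hmapnd : ((PySem.List.enumerate vals 0).map (fun q => q.2)).Nodup := by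
    rw [PySem.List.map_snd_enumerate]
    exact hnd
  have hitems := PySem.Dict.items_foldl_insert_fresh (d := (PySem.Dict.empty : PySem.Dict Int Int))
    (l := PySem.List.enumerate vals 0) (k := fun q => q.2) (v := fun q => q.1) hfresh hmapnd
  apply PySem.Dict.getD_of_mem_items
  · rw [hitems]
    have hmem : ((0 : Int) + (k : Int), vals[k]) ∈ PySem.List.enumerate vals 0 :=
      (PySem.List.mem_enumerate_iff _ _ _).mpr ⟨k, hk, rfl⟩
    have h2 := List.mem_map_of_mem (f := fun (q : Int × Int) => (q.2, q.1)) hmem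
    rw [List.mem_append]
    right
    simpa using h2
  · exact PySem.Dict.nodup_keys_foldl_insert_key _ _ _ _ PySem.Dict.nodup_keys_empty

-- ---------- the B-side loop invariant ----------

def pvVals (p : List Int) : List Int :=
  PySem.List.sorted (PySem.Set.ofList p) (fun x => x) false

def pvIdx (p : List Int) : PySem.Dict Int Int :=
  (PySem.List.enumerate (pvVals p) 0).foldl
    (fun (d : PySem.Dict Int Int) q => d.insert q.2 q.1) PySem.Dict.empty

def pvBStep (p : List Int) (st : List Int × List Int) (cup : Int) : List Int × List Int :=
  let m := (pvVals p).length
  let k := ((pvIdx p).getD cup 0).toNat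
  let b := max (pvQuery st.1 m (k + 1) m) (pvQuery st.2 m 0 (k + 1))
  (pvUpdate st.1 m k (b + 1), pvUpdate st.2 m k (b + 2 * cup - 1))

def pvGVal (d : PySem.Dict Int (Int × Int)) (cup : Int) : Int × Int :=
  let m := d.items.foldl
    (fun (m : Int × Int) q =>
      if cup < q.1 then (max m.1 (q.2.1 + 1), m.2)
      else (m.1, max m.2 q.2.2))
    (0, 0)
  let nb := max m.1 m.2
  (nb, nb + 2 * cup - 1)

lemma pv_pfold_le {α : Type} (g : α → Int) :
    ∀ (l : List α) (a c : Int), a ≤ c → (∀ x ∈ l, g x ≤ c) →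
      l.foldl (fun acc x => max acc (g x)) a ≤ c := by
  intro l
  induction l with
  | nil => intro a c h0 _; simpa using h0
  | cons y t ih =>
    intro a c h0 h
    simp only [List.foldl_cons]
    exact ih _ c (max_le h0 (h y List.mem_cons_self)) (fun x hx => h x (List.mem_cons_of_mem _ hx))

lemma pv_treeOK_congr (m : Nat) (t : List Int) (f f' : Nat → Int)
    (h : pvTreeOK m t f) (he : ∀ j, j < m → f j = f' j) : pvTreeOK m t f' :=
  ⟨h.1, fun j hj => (h.2.1 j hj).trans (he j hj), h.2.2⟩

lemma pv_b_loop (p : List Int) :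
    ∀ (rest : List Int) (d : PySem.Dict Int (Int × Int)) (trB trT : List Int),
      (∀ x ∈ rest, x ∈ pvVals p) →
      d.keys.Nodup →
      (∀ v ∈ d.keys, v ∈ pvVals p) →
      pvTreeOK (pvVals p).length trB (pvFB (pvVals p) d) →
      pvTreeOK (pvVals p).length trT (pvFT (pvVals p) d) →
      pvTreeOK (pvVals p).length (rest.foldl (pvBStep p) (trB, trT)).1
          (pvFB (pvVals p) (rest.foldl pvGStep d))
        ∧ pvTreeOK (pvVals p).length (rest.foldl (pvBStep p) (trB, trT)).2
          (pvFT (pvVals p) (rest.foldl pvGStep d))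
        ∧ (rest.foldl pvGStep d).keys.Nodup
        ∧ (∀ v ∈ (rest.foldl pvGStep d).keys, v ∈ pvVals p) := by
  have hplv : (pvVals p).Pairwise (· < ·) := by
    unfold pvVals
    exact PySem.List.sorted_ofList_pairwise_lt p
  have hvnd : (pvVals p).Nodup := hplv.imp (fun {a b} h => ne_of_lt h)
  have hmono := List.pairwise_iff_getElem.mp hplv
  have hgd : ∀ (j : Nat) (hj : j < (pvVals p).length), (pvVals p).getD j 0 = (pvVals p)[j] :=
    fun j hj => List.getD_eq_getElem _ _ hj
  intro rest
  induction rest with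
  | nil => intro d trB trT _ hnd hkeys hTB hTT; exact ⟨hTB, hTT, hnd, hkeys⟩
  | cons cup rest' ih =>
    intro d trB trT hrest hnd hkeys hTB hTT
    obtain ⟨k0, hk0, hvk⟩ := List.mem_iff_getElem.mp (hrest cup List.mem_cons_self)
    have hm1 : 1 ≤ (pvVals p).length := by omega
    have hk' : (((pvIdx p).getD cup 0)).toNat = k0 := by
      have h1 : (pvIdx p).getD ((pvVals p)[k0]) 0 = (k0 : Int) := by
        unfold pvIdx
        exact pv_idx_getD (pvVals p) hvnd k0 hk0
      rw [hvk] at h1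
      rw [h1]
      simp
    -- the two scans of the ghost dict
    set sB := d.items.foldl
      (fun acc (q : Int × Int × Int) => if cup < q.1 then max acc (q.2.1 + 1) else acc) 0 with hsB
    set sT := d.items.foldl
      (fun acc (q : Int × Int × Int) => if cup < q.1 then acc else max acc q.2.2) 0 with hsT
    have hsTswap : sT = d.items.foldl
        (fun acc (q : Int × Int × Int) => if ¬ cup < q.1 then max acc q.2.2 else acc) 0 := by
      rw [hsT]
      apply PySem.List.foldl_congr_mem
      intro acc q _
      by_cases h : cup < q.1 <;> simp [h]
    -- the B-tree query computes sB
    have hqB : pvQuery trB (pvVals p).length (k0 + 1) (pvVals p).length = sB := by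
      rw [pv_query_leaves _ trB _ hTB (k0 + 1) _ hm1 (by omega) (le_refl _)]
      apply le_antisymm
      · apply pv_pfold_le
        · exact (pv_foldIf_bounds _ _ d.items 0).1
        · intro j hjmem
          have hjr : k0 + 1 ≤ j ∧ j < (k0 + 1) + ((pvVals p).length - (k0 + 1)) := by
            simpa [List.mem_range'_1] using hjmem
          have hjm : j < (pvVals p).length := by omega
          unfold pvFB
          cases hq : d.get? ((pvVals p).getD j 0) with
          | none => exact (pv_foldIf_bounds _ _ d.items 0).1
          | some q =>
            have hqi := PySem.Dict.mem_items_of_get?_eq_some d hq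
            have hguard : cup < (pvVals p).getD j 0 := by
              rw [hgd j hjm, ← hvk]
              exact hmono k0 j hk0 hjm (by omega)
            exact (pv_foldIf_bounds (fun (q : Int × Int × Int) => cup < q.1)
              (fun q => q.2.1 + 1) d.items 0).2 _ hqi hguard
      · apply pv_foldIf_ub
        · exact (PySem.List.le_foldl_max_int _ _ 0).1
        · intro q hq hguard
          have hkv : q.1 ∈ (pvVals p) := hkeys q.1 (PySem.Dict.mem_keys_of_mem_items _ hq)
          obtain ⟨j, hj, hvj⟩ := List.mem_iff_getElem.mp hkv
          have hlt : k0 < j := by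
            by_contra hle
            push_neg at hle
            have hle2 : (pvVals p)[j] ≤ (pvVals p)[k0] := by
              rcases Nat.lt_or_ge j k0 with h' | h'
              · exact le_of_lt (hmono j k0 hj hk0 h')
              · have : j = k0 := by omega
                subst this; exact le_refl _
            rw [hvj, hvk] at hle2
            exact absurd hguard (not_lt.mpr hle2)
          have hmem' : j ∈ List.range' (k0 + 1) ((pvVals p).length - (k0 + 1)) := by
            simp only [List.mem_range'_1]
            omega
          have hval : pvFB (pvVals p) d j = q.2.1 + 1 := by
            unfold pvFB
            rw [hgd j hj, hvj, PySem.Dict.get?_of_mem_items d hq hnd]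
          have hle3 := (PySem.List.le_foldl_max_int
            (List.range' (k0 + 1) ((pvVals p).length - (k0 + 1)))
            (fun j => pvFB (pvVals p) d j) 0).2 j hmem'
          rw [hval] at hle3
          exact hle3
    -- the T-tree query computes sT
    have hqT : pvQuery trT (pvVals p).length 0 (k0 + 1) = sT := by
      rw [pv_query_leaves _ trT _ hTT 0 (k0 + 1) hm1 (by omega) (by omega), hsTswap,
        Nat.sub_zero]
      apply le_antisymm
      · apply pv_pfold_le
        · exact (pv_foldIf_bounds _ _ d.items 0).1
        · intro j hjmem
          have hjr : 0 ≤ j ∧ j < 0 + (k0 + 1) := by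
            simpa [List.mem_range'_1] using hjmem
          have hjm : j < (pvVals p).length := by omega
          unfold pvFT
          cases hq : d.get? ((pvVals p).getD j 0) with
          | none => exact (pv_foldIf_bounds _ _ d.items 0).1
          | some q =>
            have hqi := PySem.Dict.mem_items_of_get?_eq_some d hq
            have hguard : ¬ cup < (pvVals p).getD j 0 := by
              rw [hgd j hjm, ← hvk]
              apply not_lt.mpr
              rcases Nat.lt_or_ge j k0 with h' | h'
              · exact le_of_lt (hmono j k0 hjm hk0 h')
              · have : j = k0 := by omega
                subst this; exact le_refl _
            exact (pv_foldIf_bounds (fun (q : Int × Int × Int) => ¬ cup < q.1)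
              (fun q => q.2.2) d.items 0).2 _ hqi hguard
      · apply pv_foldIf_ub
        · exact (PySem.List.le_foldl_max_int _ _ 0).1
        · intro q hq hguard
          have hkv : q.1 ∈ (pvVals p) := hkeys q.1 (PySem.Dict.mem_keys_of_mem_items _ hq)
          obtain ⟨j, hj, hvj⟩ := List.mem_iff_getElem.mp hkv
          have hlt : j ≤ k0 := by
            by_contra hle
            push_neg at hle
            have := hmono k0 j hk0 hj hle
            rw [hvj, hvk] at this
            exact hguard this
          have hmem' : j ∈ List.range' 0 (k0 + 1) := by
            simp only [List.mem_range'_1]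
            omega
          have hval : pvFT (pvVals p) d j = q.2.2 := by
            unfold pvFT
            rw [hgd j hj, hvj, PySem.Dict.get?_of_mem_items d hq hnd]
          have hle3 := (PySem.List.le_foldl_max_int (List.range' 0 (k0 + 1))
            (fun j => pvFT (pvVals p) d j) 0).2 j hmem'
          rw [hval] at hle3
          exact hle3
    -- the B step is an update at k0 with b = max sB sT
    have hstep : pvBStep p (trB, trT) cup
        = (pvUpdate trB (pvVals p).length k0 (max sB sT + 1),
           pvUpdate trT (pvVals p).length k0 (max sB sT + 2 * cup - 1)) := by
      simp only [pvBStep, hk', hqB, hqT]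
    -- the ghost step is an insert of the same pair
    have hg : pvGStep d cup = d.insert cup (max sB sT, max sB sT + 2 * cup - 1) := by
      unfold pvGStep
      rw [pv_split (fun (q : Int × Int × Int) => cup < q.1)
        (fun q => q.2.1 + 1) (fun q => q.2.2) d.items 0 0]
    set d2 := d.insert cup (max sB sT, max sB sT + 2 * cup - 1) with hd2
    have hne : ∀ j, j < (pvVals p).length → j ≠ k0 → (pvVals p).getD j 0 ≠ cup := by
      intro j hj hjk
      rw [hgd j hj, ← hvk]
      rcases Nat.lt_or_ge j k0 with h' | h'
      · exact ne_of_lt (hmono j k0 hj hk0 h')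
      · exact ne_of_gt (hmono k0 j hk0 hj (by omega))
    have hfB2 : ∀ j, j < (pvVals p).length →
        (if j = k0 then max sB sT + 1 else pvFB (pvVals p) d j) = pvFB (pvVals p) d2 j := by
      intro j hj
      by_cases hjk : j = k0
      · subst hjk
        rw [if_pos rfl]
        unfold pvFB
        rw [hd2, hgd j hj, hvk, PySem.Dict.get?_insert_self]
      · rw [if_neg hjk]
        unfold pvFB
        rw [hd2, PySem.Dict.get?_insert_of_ne _ _ (hne j hj hjk)]
    have hfT2 : ∀ j, j < (pvVals p).length →
        (if j = k0 then max sB sT + 2 * cup - 1 else pvFT (pvVals p) d j)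
          = pvFT (pvVals p) d2 j := by
      intro j hj
      by_cases hjk : j = k0
      · subst hjk
        rw [if_pos rfl]
        unfold pvFT
        rw [hd2, hgd j hj, hvk, PySem.Dict.get?_insert_self]
      · rw [if_neg hjk]
        unfold pvFT
        rw [hd2, PySem.Dict.get?_insert_of_ne _ _ (hne j hj hjk)]
    rw [List.foldl_cons, List.foldl_cons, hstep, hg]
    apply ih d2 _ _ (fun x hx => hrest x (List.mem_cons_of_mem _ hx))
    · exact PySem.Dict.nodup_keys_insert d cup _ hnd
    · intro v hv
      rcases (PySem.Dict.mem_keys_insert _ _ _ _).mp hv with h' | h'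
      · rw [h']
        exact hrest _ List.mem_cons_self
      · exact hkeys v h'
    · exact pv_treeOK_congr _ _ _ _
        (pv_treeOK_update _ k0 (max sB sT + 1) trB _ hTB hk0) hfB2
    · exact pv_treeOK_congr _ _ _ _
        (pv_treeOK_update _ k0 (max sB sT + 2 * cup - 1) trT _ hTT hk0) hfT2

-- ===== VERDICT (by name: the statement is the Claim_ definition above) =====
lemma pv_ghost_fun (p : List Int) :
    List.foldl pvGStep PySem.Dict.empty p
      = List.foldl (fun d x => d.insert x (pvGVal d x)) PySem.Dict.empty p := by
  apply PySem.List.foldl_congr_mem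
  intro d x _
  rfl

theorem calc_py_spec : Claim_equal_calc_py := by
  intro p _ hpre
  unfold Spec_calc_py
  -- A's loop state is the value-projection of the ghost fold
  have hA := pv_loop_rel p p [] PySem.Dict.empty PySem.Dict.empty PySem.Dict.empty
    rfl rfl rfl (by simp [PySem.Dict.keys_empty]) (by simp [PySem.Dict.keys_empty])
  simp only [List.length_nil, Nat.cast_zero] at hA
  have hkeysfin : (p.foldl pvGStep PySem.Dict.empty).keys = PySem.Set.ofList p := by
    rw [pv_ghost_fun p,
      PySem.Dict.keys_foldl_insert_key p (fun x => x) (fun d x => pvGVal d x) PySem.Dict.empty]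
    simp only [PySem.Dict.keys_empty, List.map_id_fun', id]
    exact PySem.Set.update_empty p
  have hndfin : (p.foldl pvGStep PySem.Dict.empty).keys.Nodup := by
    rw [pv_ghost_fun p]
    exact PySem.Dict.nodup_keys_foldl_insert_key p (fun x => x) (fun d x => pvGVal d x)
      PySem.Dict.empty PySem.Dict.nodup_keys_empty
  have hcalc : calc_py p
      = (match PySem.List.max?
          ((p.foldl pvGStep PySem.Dict.empty).items.map (fun q => q.2.2)) (fun x => x) with
        | some v => v
        | none => 0) := by
    unfold calc_py
    simp only [PySem.Dict.values]
    rw [hA, List.map_map]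
    rfl
  -- B's loop state: tree leaves carry the ghost dict's values
  have hmemvals : ∀ x ∈ p, x ∈ pvVals p := by
    intro x hx
    unfold pvVals
    rw [PySem.List.mem_sorted, PySem.Set.mem_ofList]
    exact hx
  have hTB0 : pvTreeOK (pvVals p).length (List.replicate (2 * (pvVals p).length) 0)
      (pvFB (pvVals p) PySem.Dict.empty) := by
    apply pv_treeOK_congr _ _ _ _ (pv_treeOK_replicate _)
    intro j hj
    simp [pvFB, PySem.Dict.get?_empty]
  have hTT0 : pvTreeOK (pvVals p).length (List.replicate (2 * (pvVals p).length) 0)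
      (pvFT (pvVals p) PySem.Dict.empty) := by
    apply pv_treeOK_congr _ _ _ _ (pv_treeOK_replicate _)
    intro j hj
    simp [pvFT, PySem.Dict.get?_empty]
  have hB := pv_b_loop p p PySem.Dict.empty
    (List.replicate (2 * (pvVals p).length) 0) (List.replicate (2 * (pvVals p).length) 0)
    hmemvals PySem.Dict.nodup_keys_empty (by simp [PySem.Dict.keys_empty]) hTB0 hTT0
  obtain ⟨_, hTT', _, _⟩ := hB
  have halt : calc_py_alt p
      = (match PySem.List.max?
          ((List.range (pvVals p).length).map
            (fun i => (p.foldl (pvBStep p)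
              (List.replicate (2 * (pvVals p).length) 0,
               List.replicate (2 * (pvVals p).length) 0)).2.getD ((pvVals p).length + i) 0))
          (fun x => x) with
        | some v => v
        | none => 0) := rfl
  rw [hcalc, halt]
  have hleafmap : (List.range (pvVals p).length).map
        (fun i => (p.foldl (pvBStep p)
          (List.replicate (2 * (pvVals p).length) 0,
           List.replicate (2 * (pvVals p).length) 0)).2.getD ((pvVals p).length + i) 0)
      = (List.range (pvVals p).length).map
        (fun i => pvFT (pvVals p) (p.foldl pvGStep PySem.Dict.empty) i) := by
    apply List.map_congr_left
    intro i hi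
    exact hTT'.2.1 i (List.mem_range.mp hi)
  rw [hleafmap]
  -- nonemptiness
  obtain ⟨x0, hx0⟩ := List.exists_mem_of_ne_nil p hpre
  have hm1 : 0 < (pvVals p).length := List.length_pos_of_mem (hmemvals x0 hx0)
  have hitemsne : (p.foldl pvGStep PySem.Dict.empty).items ≠ [] := by
    intro h
    have hxk : x0 ∈ (p.foldl pvGStep PySem.Dict.empty).keys := by
      rw [hkeysfin, PySem.Set.mem_ofList]
      exact hx0
    simp only [PySem.Dict.keys, h, List.map_nil] at hxk
    exact (List.not_mem_nil) hxk
  -- every A value is a B value and vice versa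
  have hAB : ∀ y ∈ (p.foldl pvGStep PySem.Dict.empty).items.map (fun q => q.2.2),
      y ∈ (List.range (pvVals p).length).map
        (fun i => pvFT (pvVals p) (p.foldl pvGStep PySem.Dict.empty) i) := by
    intro y hy
    obtain ⟨q, hq, rfl⟩ := List.mem_map.mp hy
    have hk : q.1 ∈ pvVals p := by
      have h1 : q.1 ∈ (p.foldl pvGStep PySem.Dict.empty).keys :=
        PySem.Dict.mem_keys_of_mem_items _ hq
      rw [hkeysfin, PySem.Set.mem_ofList] at h1
      exact hmemvals _ h1
    obtain ⟨j, hj, hvj⟩ := List.mem_iff_getElem.mp hk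
    refine List.mem_map.mpr ⟨j, List.mem_range.mpr hj, ?_⟩
    unfold pvFT
    rw [List.getD_eq_getElem _ _ hj, hvj,
      PySem.Dict.get?_of_mem_items _ hq hndfin]
  have hBA : ∀ y ∈ (List.range (pvVals p).length).map
        (fun i => pvFT (pvVals p) (p.foldl pvGStep PySem.Dict.empty) i),
      y ∈ (p.foldl pvGStep PySem.Dict.empty).items.map (fun q => q.2.2) := by
    intro y hy
    obtain ⟨j, hjr, rfl⟩ := List.mem_map.mp hy
    have hj := List.mem_range.mp hjr
    have hkmem : (pvVals p)[j] ∈ (p.foldl pvGStep PySem.Dict.empty).keys := by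
      rw [hkeysfin, PySem.Set.mem_ofList]
      have h3 : (pvVals p)[j] ∈ pvVals p := List.getElem_mem hj
      unfold pvVals at h3
      rw [PySem.List.mem_sorted, PySem.Set.mem_ofList] at h3
      exact h3
    cases hq : (p.foldl pvGStep PySem.Dict.empty).get? ((pvVals p)[j]) with
    | none =>
      exact absurd hkmem ((PySem.Dict.get?_eq_none_iff_not_mem_keys _ _).mp hq)
    | some q =>
      refine List.mem_map.mpr
        ⟨((pvVals p)[j], q), PySem.Dict.mem_items_of_get?_eq_some _ hq, ?_⟩
      unfold pvFT
      rw [List.getD_eq_getElem _ _ hj, hq]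
  cases hA2 : PySem.List.max?
      ((p.foldl pvGStep PySem.Dict.empty).items.map (fun q => q.2.2)) (fun x => x) with
  | none =>
    have := (PySem.List.max?_eq_none_iff _ _).mp hA2
    rw [List.map_eq_nil_iff] at this
    exact absurd this hitemsne
  | some va =>
    cases hB2 : PySem.List.max?
        ((List.range (pvVals p).length).map
          (fun i => pvFT (pvVals p) (p.foldl pvGStep PySem.Dict.empty) i)) (fun x => x) with
    | none =>
      have := (PySem.List.max?_eq_none_iff _ _).mp hB2
      rw [List.map_eq_nil_iff, List.range_eq_nil] at this
      omega
    | some vb =>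
      have h1 : va ≤ vb := PySem.List.max?_isMax hB2 va (hAB va (PySem.List.max?_mem hA2))
      have h2 : vb ≤ va := PySem.List.max?_isMax hA2 vb (hBA vb (PySem.List.max?_mem hB2))
      exact le_antisymm h1 h2
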